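-- pv_equiv track=rewrite | github.com/schwichtgit/ai-resume | ingest/ingest.py | parse_skills_section
-- ===== SOURCE A (Python) =====
-- def parse_skills_section(content: str) -> dict:
--     """Parse the Skills Assessment section."""
--     skills = {
--         "strong": [],
--         "moderate": [],
--         "gaps": []
--     }
--
--     current_category = None
--
--     for line in content.split("\n"):
--         # Match ### headings for skill categories
--         if line.startswith("### Strong"):
--             current_category = "strong"
--         elif line.startswith("### Moderate"):
--             current_category = "moderate"
--         elif line.startswith("### Gaps"):
--             current_category = "gaps"
--         # Extract skill bullets (format: "- **Skill Name:** description")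
--         elif line.startswith("- **") and current_category:
--             # Extract just the skill name (between ** and :**)
--             # Remove "- " prefix first
--             line_content = line[2:].strip()
--             if line_content.startswith("**") and ":**" in line_content:
--                 # Extract between ** and :**
--                 skill_name = line_content[2:].split(":**", 1)[0].strip()
--                 skills[current_category].append(skill_name)
--
--     return skills
-- ===== SOURCE B (Python) =====
-- def parse_skills_section(content: str) -> dict:
--     """Parse the Skills Assessment section: first group raw lines under their
--     category heading, then extract skill names per category."""
--     headings = (("### Strong", "strong"), ("### Moderate", "moderate"), ("### Gaps", "gaps"))
--     buckets = {"strong": [], "moderate": [], "gaps": []}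
--     category = None
--     for line in content.split("\n"):
--         hit = next((cat for prefix, cat in headings if line.startswith(prefix)), None)
--         if hit is not None:
--             category = hit
--         elif category is not None:
--             buckets[category].append(line)
--
--     def extract(lines):
--         names = []
--         for line in lines:
--             if line.startswith("- **"):
--                 body = line[2:].strip()
--                 if body.startswith("**") and ":**" in body:
--                     names.append(body[2:].split(":**", 1)[0].strip())
--         return names
--
--     return {cat: extract(buckets[cat]) for cat in ("strong", "moderate", "gaps")}
-- ===== Notes on version B (the rewrite author's own statement) =====
-- stated objective: alternative
-- what changed: A's single fused loop (which classifies headings and extracts skill names in one pass) is replaced by a two-phase decomposition: phase 1 only tracks the current category and buckets every non-heading raw line under it, phase 2 runs a separate extraction pass over each bucket to produce the skill-name lists.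
import Mathlib
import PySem

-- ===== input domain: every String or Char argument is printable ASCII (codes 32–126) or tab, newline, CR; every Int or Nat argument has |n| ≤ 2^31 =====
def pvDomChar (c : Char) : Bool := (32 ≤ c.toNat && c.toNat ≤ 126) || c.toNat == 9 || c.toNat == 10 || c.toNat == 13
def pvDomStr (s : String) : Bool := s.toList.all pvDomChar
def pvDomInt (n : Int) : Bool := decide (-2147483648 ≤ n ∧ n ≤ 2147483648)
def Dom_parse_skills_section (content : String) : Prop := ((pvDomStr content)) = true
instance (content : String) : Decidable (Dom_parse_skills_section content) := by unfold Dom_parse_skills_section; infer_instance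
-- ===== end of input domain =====

-- B regroups A's fused single loop into two passes (bucket raw lines per category, then
-- extract skill names per bucket); objective: alternative decomposition, same cost.

-- ===== PORT A =====
-- skill-name extraction: line_content[2:].split(":**", 1)[0].strip(); the "" fallback is
-- unreachable (sep ":**" ≠ "" so splitMax? is some, and a split result is never empty)
def pvSkillNameA (lineContent : String) : String :=
  PySem.Str.strip
    (match PySem.Str.splitMax? (PySem.Str.slice lineContent (some 2) none) ":**" 1 with
     | some (x :: _) => x
     | _ => "")

def pvStepA (st : PySem.Dict String (List String) × Option String) (line : String) :
    PySem.Dict String (List String) × Option String :=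
  if PySem.Str.startswith line "### Strong" then (st.1, some "strong")
  else if PySem.Str.startswith line "### Moderate" then (st.1, some "moderate")
  else if PySem.Str.startswith line "### Gaps" then (st.1, some "gaps")
  else if PySem.Str.startswith line "- **" then
    match st.2 with
    | some cat =>
      -- line_content = line[2:].strip()
      if PySem.Str.startswith (PySem.Str.strip (PySem.Str.slice line (some 2) none)) "**"
          && PySem.Str.isIn ":**" (PySem.Str.strip (PySem.Str.slice line (some 2) none)) then
        (st.1.modify cat []
           (· ++ [pvSkillNameA (PySem.Str.strip (PySem.Str.slice line (some 2) none))]), st.2)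
      else st
    | none => st
  else st

def parse_skills_section (content : String) : List (String × List String) :=
  let skills : PySem.Dict String (List String) :=
    PySem.Dict.mk [("strong", []), ("moderate", []), ("gaps", [])]
  -- content.split("\n"): sep ≠ "" so split? is always some
  let lines := (PySem.Str.split? content "\n").getD []
  ((lines.foldl pvStepA (skills, none)).1).items

-- ===== PORT B =====
def pvHeadingHit (line : String) : Option String :=
  [("### Strong", "strong"), ("### Moderate", "moderate"), ("### Gaps", "gaps")].findSome?
    (fun pc => if PySem.Str.startswith line pc.1 then some pc.2 else none)

def pvStepB (st : PySem.Dict String (List String) × Option String) (line : String) :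
    PySem.Dict String (List String) × Option String :=
  match pvHeadingHit line with
  | some cat => (st.1, some cat)
  | none =>
    match st.2 with
    | some cat => (st.1.modify cat [] (· ++ [line]), st.2)
    | none => st

def pvExtract : List String → List String
  | [] => []
  | line :: rest =>
    if PySem.Str.startswith line "- **" then
      -- body = line[2:].strip()
      if PySem.Str.startswith (PySem.Str.strip (PySem.Str.slice line (some 2) none)) "**"
          && PySem.Str.isIn ":**" (PySem.Str.strip (PySem.Str.slice line (some 2) none)) then
        PySem.Str.strip
          (match PySem.Str.splitMax?
              (PySem.Str.slice (PySem.Str.strip (PySem.Str.slice line (some 2) none)) (some 2) none)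
              ":**" 1 with
           | some (x :: _) => x
           | _ => "") :: pvExtract rest
      else pvExtract rest
    else pvExtract rest

def parse_skills_section_alt (content : String) : List (String × List String) :=
  let buckets0 : PySem.Dict String (List String) :=
    PySem.Dict.mk [("strong", []), ("moderate", []), ("gaps", [])]
  let lines := (PySem.Str.split? content "\n").getD []
  let buckets := (lines.foldl pvStepB (buckets0, none)).1
  ["strong", "moderate", "gaps"].map (fun c => (c, pvExtract (buckets.getD c [])))

-- ===== PRECONDITION & SPEC =====
def Spec_parse_skills_section (content : String) (out : List (String × List String)) : Prop := out = parse_skills_section_alt content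
instance (content : String) (out : List (String × List String)) : Decidable (Spec_parse_skills_section content out) := by unfold Spec_parse_skills_section; infer_instance

-- ===== CLAIM (what is proved, stated in full; the proofs are below) =====
def Claim_equal_parse_skills_section : Prop := ∀ (content : String), Dom_parse_skills_section content → Spec_parse_skills_section content (parse_skills_section content)

-- ===== LEMMAS AND PROOFS =====

-- category set by a heading line, if any
def pvHeadCat (line : String) : Option String :=
  if PySem.Str.startswith line "### Strong" then some "strong"
  else if PySem.Str.startswith line "### Moderate" then some "moderate"
  else if PySem.Str.startswith line "### Gaps" then some "gaps"
  else none

-- the raw lines collected into category k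
def pvBucket : List String → Option String → String → List String
  | [], _, _ => []
  | l :: ls, c, k =>
    match pvHeadCat l with
    | some c' => pvBucket ls (some c') k
    | none =>
      match c with
      | some c' => (if c' = k then [l] else []) ++ pvBucket ls c k
      | none => pvBucket ls c k

-- the 0-or-1 skill names a single collected line contributes
def pvE (l : String) : List String :=
  if PySem.Str.startswith l "- **" then
    if PySem.Str.startswith (PySem.Str.strip (PySem.Str.slice l (some 2) none)) "**"
        && PySem.Str.isIn ":**" (PySem.Str.strip (PySem.Str.slice l (some 2) none)) then
      [pvSkillNameA (PySem.Str.strip (PySem.Str.slice l (some 2) none))]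
    else []
  else []

def pvMk (a b g : List String) : PySem.Dict String (List String) :=
  PySem.Dict.mk [("strong", a), ("moderate", b), ("gaps", g)]

theorem pvHeadingHit_eq (line : String) : pvHeadingHit line = pvHeadCat line := by
  unfold pvHeadingHit pvHeadCat
  simp only [List.findSome?]
  split_ifs <;> rfl

theorem pvExtract_nil : pvExtract [] = [] := rfl

theorem pvExtract_cons (l : String) (r : List String) :
    pvExtract (l :: r) = pvE l ++ pvExtract r := by
  simp only [pvExtract, pvE]
  split_ifs <;> simp [pvSkillNameA]

def pvCatOK (c : Option String) : Prop :=
  c = none ∨ c = some "strong" ∨ c = some "moderate" ∨ c = some "gaps"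

theorem pvCatOK_headCat (l : String) (c' : String) (hh : pvHeadCat l = some c') :
    pvCatOK (some c') := by
  unfold pvHeadCat at hh; split_ifs at hh <;> simp_all [pvCatOK]

theorem pvFoldB (ls : List String) :
    ∀ (c : Option String) (a b g : List String), pvCatOK c →
    (ls.foldl pvStepB (pvMk a b g, c)).1
      = pvMk (a ++ pvBucket ls c "strong") (b ++ pvBucket ls c "moderate")
             (g ++ pvBucket ls c "gaps") := by
  induction ls with
  | nil => intro c a b g _; simp [pvBucket]
  | cons l ls ih =>
    intro c a b g hc
    simp only [List.foldl_cons]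
    cases hh : pvHeadCat l with
    | some c' =>
      have hstep : pvStepB (pvMk a b g, c) l = (pvMk a b g, some c') := by
        unfold pvStepB; rw [pvHeadingHit_eq, hh]
      rw [hstep, ih (some c') a b g (pvCatOK_headCat l c' hh)]
      simp [pvBucket, hh]
    | none =>
      rcases hc with h | h | h | h <;> subst h
      · have hstep : pvStepB (pvMk a b g, none) l = (pvMk a b g, none) := by
          unfold pvStepB; rw [pvHeadingHit_eq, hh]
        rw [hstep, ih none a b g (Or.inl rfl)]
        simp [pvBucket, hh]
      · have hstep : pvStepB (pvMk a b g, some "strong") l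
            = (pvMk (a ++ [l]) b g, some "strong") := by
          unfold pvStepB; rw [pvHeadingHit_eq, hh]; rfl
        rw [hstep, ih (some "strong") (a ++ [l]) b g (Or.inr (Or.inl rfl))]
        simp [pvBucket, hh, List.append_assoc]
      · have hstep : pvStepB (pvMk a b g, some "moderate") l
            = (pvMk a (b ++ [l]) g, some "moderate") := by
          unfold pvStepB; rw [pvHeadingHit_eq, hh]; rfl
        rw [hstep, ih (some "moderate") a (b ++ [l]) g (Or.inr (Or.inr (Or.inl rfl)))]
        simp [pvBucket, hh, List.append_assoc]
      · have hstep : pvStepB (pvMk a b g, some "gaps") l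
            = (pvMk a b (g ++ [l]), some "gaps") := by
          unfold pvStepB; rw [pvHeadingHit_eq, hh]; rfl
        rw [hstep, ih (some "gaps") a b (g ++ [l]) (Or.inr (Or.inr (Or.inr rfl)))]
        simp [pvBucket, hh, List.append_assoc]

theorem pvFoldA (ls : List String) :
    ∀ (c : Option String) (a b g : List String), pvCatOK c →
    (ls.foldl pvStepA (pvMk a b g, c)).1
      = pvMk (a ++ pvExtract (pvBucket ls c "strong"))
             (b ++ pvExtract (pvBucket ls c "moderate"))
             (g ++ pvExtract (pvBucket ls c "gaps")) := by
  induction ls with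
  | nil => intro c a b g _; simp [pvBucket, pvExtract_nil]
  | cons l ls ih =>
    intro c a b g hc
    simp only [List.foldl_cons]
    by_cases h1 : PySem.Str.startswith l "### Strong" = true
    · have hh : pvHeadCat l = some "strong" := by unfold pvHeadCat; rw [if_pos h1]
      have hstep : pvStepA (pvMk a b g, c) l = (pvMk a b g, some "strong") := by
        unfold pvStepA; rw [if_pos h1]
      rw [hstep, ih (some "strong") a b g (Or.inr (Or.inl rfl))]
      simp [pvBucket, hh]
    · by_cases h2 : PySem.Str.startswith l "### Moderate" = true
      · have hh : pvHeadCat l = some "moderate" := by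
          unfold pvHeadCat; rw [if_neg h1, if_pos h2]
        have hstep : pvStepA (pvMk a b g, c) l = (pvMk a b g, some "moderate") := by
          unfold pvStepA; rw [if_neg h1, if_pos h2]
        rw [hstep, ih (some "moderate") a b g (Or.inr (Or.inr (Or.inl rfl)))]
        simp [pvBucket, hh]
      · by_cases h3 : PySem.Str.startswith l "### Gaps" = true
        · have hh : pvHeadCat l = some "gaps" := by
            unfold pvHeadCat; rw [if_neg h1, if_neg h2, if_pos h3]
          have hstep : pvStepA (pvMk a b g, c) l = (pvMk a b g, some "gaps") := by
            unfold pvStepA; rw [if_neg h1, if_neg h2, if_pos h3]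
          rw [hstep, ih (some "gaps") a b g (Or.inr (Or.inr (Or.inr rfl)))]
          simp [pvBucket, hh]
        · have hh : pvHeadCat l = none := by
            unfold pvHeadCat; rw [if_neg h1, if_neg h2, if_neg h3]
          rcases hc with h | h | h | h <;> subst h
          · have hstep : pvStepA (pvMk a b g, none) l = (pvMk a b g, none) := by
              unfold pvStepA; rw [if_neg h1, if_neg h2, if_neg h3]
              split_ifs <;> rfl
            rw [hstep, ih none a b g (Or.inl rfl)]
            simp [pvBucket, hh]
          · have hstep : pvStepA (pvMk a b g, some "strong") l
                = (pvMk (a ++ pvE l) b g, some "strong") := by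
              unfold pvStepA pvE; rw [if_neg h1, if_neg h2, if_neg h3]
              split_ifs <;> first | rfl | simp
            rw [hstep, ih (some "strong") (a ++ pvE l) b g (Or.inr (Or.inl rfl))]
            have hbk : ∀ k, pvBucket (l :: ls) (some "strong") k
                = (if "strong" = k then [l] else []) ++ pvBucket ls (some "strong") k := by
              intro k; simp [pvBucket, hh]
            simp [hbk, pvExtract_cons, List.append_assoc]
          · have hstep : pvStepA (pvMk a b g, some "moderate") l
                = (pvMk a (b ++ pvE l) g, some "moderate") := by
              unfold pvStepA pvE; rw [if_neg h1, if_neg h2, if_neg h3]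
              split_ifs <;> first | rfl | simp
            rw [hstep, ih (some "moderate") a (b ++ pvE l) g (Or.inr (Or.inr (Or.inl rfl)))]
            have hbk : ∀ k, pvBucket (l :: ls) (some "moderate") k
                = (if "moderate" = k then [l] else []) ++ pvBucket ls (some "moderate") k := by
              intro k; simp [pvBucket, hh]
            simp [hbk, pvExtract_cons, List.append_assoc]
          · have hstep : pvStepA (pvMk a b g, some "gaps") l
                = (pvMk a b (g ++ pvE l), some "gaps") := by
              unfold pvStepA pvE; rw [if_neg h1, if_neg h2, if_neg h3]
              split_ifs <;> first | rfl | simp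
            rw [hstep, ih (some "gaps") a b (g ++ pvE l) (Or.inr (Or.inr (Or.inr rfl)))]
            have hbk : ∀ k, pvBucket (l :: ls) (some "gaps") k
                = (if "gaps" = k then [l] else []) ++ pvBucket ls (some "gaps") k := by
              intro k; simp [pvBucket, hh]
            simp [hbk, pvExtract_cons, List.append_assoc]

-- ===== VERDICT (by name: the statement is the Claim_ definition above) =====
theorem parse_skills_section_spec : Claim_equal_parse_skills_section := by
  intro content _
  show ((((PySem.Str.split? content "\n").getD []).foldl pvStepA (pvMk [] [] [], none)).1).items
      = ["strong", "moderate", "gaps"].map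
          (fun c => (c, pvExtract (((((PySem.Str.split? content "\n").getD []).foldl pvStepB
              (pvMk [] [] [], none)).1).getD c [])))
  rw [pvFoldA _ none [] [] [] (Or.inl rfl), pvFoldB _ none [] [] [] (Or.inl rfl)]
  rfl
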